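-- pv_equiv track=rewrite | github.com/CaelinusAl/sanri-api | app/services/memory_evolution_engine.py | evolve_memory
-- ===== SOURCE A (Python) =====
-- from typing import List, Dict
--
-- def evolve_memory(memory_list: List[Dict]) -> Dict:
--     """
--     Kullanıcının geçmiş konuşmalarından pattern çıkarır
--     """
--
--     if not memory_list:
--         return {}
--
--     patterns = []
--     emotions = []
--     topics = []
--
--     for m in memory_list:
--
--         text = (m.get("input_text") or "").lower()
--
--         if "neden" in text or "why" in text:
--             patterns.append("deep_questioning")
--
--         if "hissediyorum" in text or "feel" in text:
--             emotions.append("emotional_awareness")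
--
--         if "gelecek" in text or "future" in text:
--             topics.append("future_focus")
--
--     return {
--         "pattern": list(set(patterns)),
--         "emotion": list(set(emotions)),
--         "topics": list(set(topics))
--     }
-- ===== SOURCE B (Python) =====
-- from typing import List, Dict
--
-- def evolve_memory(memory_list: List[Dict]) -> Dict:
--     """
--     Kullanicinin gecmis konusmalarindan pattern cikarir
--     """
--     if not memory_list:
--         return {}
--
--     texts = [(m.get("input_text") or "").lower() for m in memory_list]
--
--     return {
--         "pattern": ["deep_questioning"] if any("neden" in t or "why" in t for t in texts) else [],
--         "emotion": ["emotional_awareness"] if any("hissediyorum" in t or "feel" in t for t in texts) else [],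
--         "topics": ["future_focus"] if any("gelecek" in t or "future" in t for t in texts) else [],
--     }
-- ===== Notes on version B (the rewrite author's own statement) =====
-- stated objective: simpler
-- what changed: Replaces the single loop that accumulates three duplicate-laden tag lists and then deduplicates each with list(set(...)) by three stateless any() existence scans that build each singleton-or-empty tag list directly, with no accumulators and no set round-trip.
import Mathlib
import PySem

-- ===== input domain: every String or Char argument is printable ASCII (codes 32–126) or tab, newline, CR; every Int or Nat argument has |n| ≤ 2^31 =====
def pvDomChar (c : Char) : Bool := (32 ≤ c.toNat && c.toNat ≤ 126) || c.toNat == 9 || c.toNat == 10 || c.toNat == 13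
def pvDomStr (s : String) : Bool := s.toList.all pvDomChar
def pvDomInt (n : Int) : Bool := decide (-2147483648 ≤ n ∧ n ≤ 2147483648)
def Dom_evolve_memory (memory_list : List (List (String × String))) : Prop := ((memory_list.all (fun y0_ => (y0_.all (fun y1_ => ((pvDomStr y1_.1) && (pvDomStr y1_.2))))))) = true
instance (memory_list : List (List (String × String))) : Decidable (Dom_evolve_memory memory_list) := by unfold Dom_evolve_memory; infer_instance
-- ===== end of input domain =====

-- B replaces A's accumulate-then-dedup loop by three independent any() existence scans; objective: simpler.

-- ===== PORT A =====
def evolve_memory (memory_list : List (List (String × String))) : List (String × List String) :=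
  if memory_list = [] then []
  else
    let r := memory_list.foldl
      (fun (acc : List String × List String × List String) m =>
        let text := PySem.Str.lower ((PySem.Dict.get? (PySem.Dict.mk m) "input_text").getD "")
        let patterns := if PySem.Str.isIn "neden" text || PySem.Str.isIn "why" text then acc.1 ++ ["deep_questioning"] else acc.1
        let emotions := if PySem.Str.isIn "hissediyorum" text || PySem.Str.isIn "feel" text then acc.2.1 ++ ["emotional_awareness"] else acc.2.1
        let topics := if PySem.Str.isIn "gelecek" text || PySem.Str.isIn "future" text then acc.2.2 ++ ["future_focus"] else acc.2.2
        (patterns, emotions, topics))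
      ([], [], [])
    [("pattern", PySem.Set.ofList r.1), ("emotion", PySem.Set.ofList r.2.1), ("topics", PySem.Set.ofList r.2.2)]

-- ===== PORT B =====
def evolve_memory_alt (memory_list : List (List (String × String))) : List (String × List String) :=
  match memory_list with
  | [] => []
  | _ =>
    let texts := memory_list.map (fun m => PySem.Str.lower ((PySem.Dict.get? (PySem.Dict.mk m) "input_text").getD ""))
    [("pattern", if texts.any (fun t => PySem.Str.isIn "neden" t || PySem.Str.isIn "why" t) then ["deep_questioning"] else []),
     ("emotion", if texts.any (fun t => PySem.Str.isIn "hissediyorum" t || PySem.Str.isIn "feel" t) then ["emotional_awareness"] else []),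
     ("topics", if texts.any (fun t => PySem.Str.isIn "gelecek" t || PySem.Str.isIn "future" t) then ["future_focus"] else [])]

-- ===== PRECONDITION & SPEC =====
def Spec_evolve_memory (memory_list : List (List (String × String))) (out : List (String × List String)) : Prop := out = evolve_memory_alt memory_list
instance (memory_list : List (List (String × String))) (out : List (String × List String)) : Decidable (Spec_evolve_memory memory_list out) := by unfold Spec_evolve_memory; infer_instance

-- ===== CLAIM (what is proved, stated in full; the proofs are below) =====
def Claim_equal_evolve_memory : Prop := ∀ (memory_list : List (List (String × String))), Dom_evolve_memory memory_list → Spec_evolve_memory memory_list (evolve_memory memory_list)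

-- ===== LEMMAS AND PROOFS =====

def pvTextOf (m : List (String × String)) : String :=
  PySem.Str.lower ((PySem.Dict.get? (PySem.Dict.mk m) "input_text").getD "")

-- A's loop, component-wise: each accumulator ends as acc ++ one constant tag per matching text.
theorem pvLoop_eq (l : List (List (String × String))) (acc : List String × List String × List String) :
    l.foldl
      (fun (acc : List String × List String × List String) m =>
        let text := PySem.Str.lower ((PySem.Dict.get? (PySem.Dict.mk m) "input_text").getD "")
        let patterns := if PySem.Str.isIn "neden" text || PySem.Str.isIn "why" text then acc.1 ++ ["deep_questioning"] else acc.1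
        let emotions := if PySem.Str.isIn "hissediyorum" text || PySem.Str.isIn "feel" text then acc.2.1 ++ ["emotional_awareness"] else acc.2.1
        let topics := if PySem.Str.isIn "gelecek" text || PySem.Str.isIn "future" text then acc.2.2 ++ ["future_focus"] else acc.2.2
        (patterns, emotions, topics)) acc
    = (acc.1 ++ ((l.map pvTextOf).filter (fun t => PySem.Str.isIn "neden" t || PySem.Str.isIn "why" t)).map (fun _ => "deep_questioning"),
       acc.2.1 ++ ((l.map pvTextOf).filter (fun t => PySem.Str.isIn "hissediyorum" t || PySem.Str.isIn "feel" t)).map (fun _ => "emotional_awareness"),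
       acc.2.2 ++ ((l.map pvTextOf).filter (fun t => PySem.Str.isIn "gelecek" t || PySem.Str.isIn "future" t)).map (fun _ => "future_focus")) := by
  induction l generalizing acc with
  | nil => simp
  | cons m rest ih =>
    simp only [List.foldl_cons, List.map_cons, List.filter_cons, ih, pvTextOf]
    obtain ⟨p, e, t⟩ := acc
    split_ifs <;> simp_all

-- set() of a constant-valued list is [] or the singleton.
theorem pvFoldl_add_const {s : PySem.Set String} (xs : List String) (tag : String)
    (h : tag ∈ s) :
    List.foldl PySem.Set.add s (xs.map (fun _ => tag)) = s := by
  induction xs with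
  | nil => rfl
  | cons x rest ih =>
    have : PySem.Set.add s tag = s := by
      simp only [PySem.Set.add]
      split <;> simp_all
    simpa [this] using ih

theorem pvOfList_const (xs : List String) (tag : String) :
    PySem.Set.ofList (xs.map (fun _ => tag)) = if xs = [] then [] else [tag] := by
  cases xs with
  | nil => simp [PySem.Set.ofList]
  | cons x rest =>
    rw [List.map_cons, PySem.Set.ofList_eq_foldl, List.foldl_cons]
    have h0 : PySem.Set.add ([] : PySem.Set String) tag = [tag] := by
      simp [PySem.Set.add, PySem.Set.contains]
    rw [h0, pvFoldl_add_const rest tag (by simp)]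
    simp

theorem pvSetTag (xs : List String) (c : String → Bool) (tag : String) :
    PySem.Set.ofList ((xs.filter c).map (fun _ => tag)) = if xs.any c then [tag] else [] := by
  rw [pvOfList_const]
  rcases h : xs.any c with _ | _
  · have : xs.filter c = [] := by
      simp only [List.any_eq_false] at h
      simpa [List.filter_eq_nil_iff] using h
    simp [this]
  · have : xs.filter c ≠ [] := by
      simp only [List.any_eq_true] at h
      obtain ⟨a, ha, hc⟩ := h
      simp [List.filter_eq_nil_iff]
      exact ⟨a, ha, hc⟩
    simp [this]

-- ===== VERDICT (by name: the statement is the Claim_ definition above) =====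
theorem evolve_memory_spec : Claim_equal_evolve_memory := by
  intro ml _
  unfold Spec_evolve_memory evolve_memory evolve_memory_alt
  cases ml with
  | nil => rfl
  | cons m rest =>
    simp only [reduceCtorEq, if_false]
    rw [pvLoop_eq]
    simp only [List.nil_append, pvSetTag, List.any_map, Function.comp_def, pvTextOf]
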